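-- pv_equiv track=rewrite | github.com/SansPapyrus683/usaco-solutions | src/section4/part2/job/machine_enslavement.py | machine_fin_times
-- ===== SOURCE A (Python) =====
-- from typing import List
--
-- def machine_fin_times(machines: List[int], job_num: int) -> List[int]:
--     """
--     note to self:
--     you can't just have all the machines run constantly
--     because if the rates are like 60 and 1, and there's only 3 tasks
--     it's better for the 60 machine to like not run at all
--     but anyways, this func calculates the minimum ending times for each job
--     """
--     finish_times = []
--     already_spent = [0 for _ in range(len(machines))]
--     for _ in range(job_num):
--         assignment_times = [already_spent[i] + machines[i] for i in range(len(machines))]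
--         best_time = min(assignment_times)
--         finish_times.append(best_time)
--         already_spent[assignment_times.index(best_time)] = best_time
--     return finish_times
-- ===== SOURCE B (Python) =====
-- from typing import List
--
--
-- def _insert_sorted(queue, entry):
--     """Insert entry into queue (sorted ascending by (time, index)), keeping it sorted."""
--     for k in range(len(queue)):
--         if entry < queue[k]:
--             queue.insert(k, entry)
--             return
--     queue.append(entry)
--
--
-- def machine_fin_times(machines: List[int], job_num: int) -> List[int]:
--     # sorted queue of (next finish time, machine index)
--     queue = []
--     for i in range(len(machines)):
--         _insert_sorted(queue, (machines[i], i))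
--     finish_times = []
--     for _ in range(job_num):
--         t, i = queue.pop(0)
--         finish_times.append(t)
--         _insert_sorted(queue, (t + machines[i], i))
--     return finish_times
-- ===== Notes on version B (the rewrite author's own statement) =====
-- stated objective: alternative
-- what changed: B keeps a queue of (next finish time, machine index) pairs sorted ascending and pops its head per job, reinserting the machine's next time, instead of A's per-job full rescan (comprehension + min + index over all machines).
-- outside the precondition, e.g. on machine_fin_times([], 2): A raises ValueError, B raises IndexError
import Mathlib
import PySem

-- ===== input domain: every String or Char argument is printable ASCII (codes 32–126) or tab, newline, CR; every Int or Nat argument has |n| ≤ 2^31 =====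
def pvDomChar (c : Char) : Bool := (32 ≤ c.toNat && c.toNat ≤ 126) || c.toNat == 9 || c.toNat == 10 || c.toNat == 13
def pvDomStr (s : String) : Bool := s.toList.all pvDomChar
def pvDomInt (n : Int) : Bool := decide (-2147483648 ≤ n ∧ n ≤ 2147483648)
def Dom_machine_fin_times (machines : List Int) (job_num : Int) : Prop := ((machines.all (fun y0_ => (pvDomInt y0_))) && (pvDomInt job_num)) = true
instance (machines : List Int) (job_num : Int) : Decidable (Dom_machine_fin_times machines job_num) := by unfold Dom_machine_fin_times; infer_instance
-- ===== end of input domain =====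

-- B replaces A's per-job full scan (comprehension + min + index) by a queue of
-- (next finish time, machine index) kept sorted ascending, popping its head per job.
-- A mutates nothing observable; equivalence is about the return value.

-- ===== PORT A =====
-- assignment_times = [already_spent[i] + machines[i] for i in range(len(machines))]
def aAssign (machines spent : List Int) : List Int :=
  (List.range machines.length).map (fun i => spent.getD i 0 + machines.getD i 0)

-- the 'for _ in range(job_num)' loop; finish_times built by cons along the recursion
def aLoop (machines : List Int) : Nat → List Int → List Int
  | 0, _ => []
  | k+1, spent =>
    let at_ := aAssign machines spent
    let best := (PySem.List.min? at_ (fun x => x)).getD 0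
    let j := (PySem.List.index? at_ best).getD 0
    best :: aLoop machines k (spent.set j best)

def machine_fin_times (machines : List Int) (job_num : Int) : List Int :=
  aLoop machines job_num.toNat (List.replicate machines.length 0)

-- ===== PORT B =====
-- _insert_sorted: linear walk, put entry before the first strictly larger (time, index) pair
def insertSorted (e : Int × Int) : List (Int × Int) → List (Int × Int)
  | [] => [e]
  | q :: rest =>
    if e.1 < q.1 ∨ (e.1 = q.1 ∧ e.2 < q.2) then e :: q :: rest else q :: insertSorted e rest

def initQueue (machines : List Int) : List (Int × Int) :=
  (List.range machines.length).foldl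
    (fun acc i => insertSorted (machines.getD i 0, (i : Int)) acc) []

def bLoop (machines : List Int) : Nat → List (Int × Int) → List Int
  | 0, _ => []
  | k+1, queue =>
    match queue with
    | [] => []   -- queue.pop(0) on empty: unreachable inside Pre_
    | (t, i) :: rest => t :: bLoop machines k (insertSorted (t + machines.getD i.toNat 0, i) rest)

def machine_fin_times_alt (machines : List Int) (job_num : Int) : List Int :=
  bLoop machines job_num.toNat (initQueue machines)

-- ===== PRECONDITION & SPEC =====
-- Pre_ excludes only machines = [] with job_num > 0: there A raises ValueError (min of
-- an empty sequence) and B raises IndexError (pop from empty list).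
def Pre_machine_fin_times (machines : List Int) (job_num : Int) : Prop :=
  machines ≠ [] ∨ job_num ≤ 0

instance (machines : List Int) (job_num : Int) : Decidable (Pre_machine_fin_times machines job_num) := by
  unfold Pre_machine_fin_times; infer_instance

def pvWitness_machine_fin_times : List Int × Int := ([60, 1], 3)

def Spec_machine_fin_times (machines : List Int) (job_num : Int) (out : List Int) : Prop := out = machine_fin_times_alt machines job_num
instance (machines : List Int) (job_num : Int) (out : List Int) : Decidable (Spec_machine_fin_times machines job_num out) := by unfold Spec_machine_fin_times; infer_instance

-- ===== CLAIM (what is proved, stated in full; the proofs are below) =====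
def Claim_equal_machine_fin_times : Prop := ∀ (machines : List Int) (job_num : Int), Dom_machine_fin_times machines job_num → Pre_machine_fin_times machines job_num → Spec_machine_fin_times machines job_num (machine_fin_times machines job_num)

-- ===== LEMMAS AND PROOFS =====

-- the lexicographic ≤ order the queue is sorted by
def lexLe (p q : Int × Int) : Prop := p.1 < q.1 ∨ (p.1 = q.1 ∧ p.2 ≤ q.2)

-- A's state, viewed as B's multiset: (next finish time, index) for every machine
def pairs (machines spent : List Int) : List (Int × Int) :=
  (List.range machines.length).map (fun i => (spent.getD i 0 + machines.getD i 0, (i : Int)))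

lemma lexLe_of_not_lt (e q : Int × Int) (h : ¬(e.1 < q.1 ∨ (e.1 = q.1 ∧ e.2 < q.2))) :
    lexLe q e := by
  unfold lexLe
  rcases lt_trichotomy q.1 e.1 with h1 | h1 | h1
  · exact Or.inl h1
  · refine Or.inr ⟨h1, ?_⟩
    by_contra hlt
    exact h (Or.inr ⟨h1.symm, by omega⟩)
  · exact absurd (Or.inl h1) h

lemma lexLe_trans (a b c : Int × Int) (h1 : lexLe a b) (h2 : lexLe b c) : lexLe a c := by
  unfold lexLe at *
  rcases h1 with h1 | ⟨h1, h1'⟩ <;> rcases h2 with h2 | ⟨h2, h2'⟩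
  · exact Or.inl (lt_trans h1 h2)
  · exact Or.inl (h2 ▸ h1)
  · exact Or.inl (h1 ▸ h2)
  · exact Or.inr ⟨h1.trans h2, le_trans h1' h2'⟩

lemma perm_insertSorted (e : Int × Int) (l : List (Int × Int)) :
    (insertSorted e l).Perm (e :: l) := by
  induction l with
  | nil => simp [insertSorted]
  | cons q rest ih =>
    simp only [insertSorted]
    split
    · exact List.Perm.refl _
    · exact (List.Perm.cons q ih).trans (List.Perm.swap e q rest)

lemma sorted_insertSorted (e : Int × Int) (l : List (Int × Int))
    (h : l.Pairwise lexLe) : (insertSorted e l).Pairwise lexLe := by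
  induction l with
  | nil => simp [insertSorted]
  | cons q rest ih =>
    rcases List.pairwise_cons.mp h with ⟨hq, hrest⟩
    simp only [insertSorted]
    split
    · rename_i hlt
      refine List.pairwise_cons.mpr ⟨?_, h⟩
      intro p hp
      have hle : lexLe e q := by
        rcases hlt with h1 | ⟨h1, h2⟩
        · exact Or.inl h1
        · exact Or.inr ⟨h1, le_of_lt h2⟩
      rcases List.mem_cons.mp hp with rfl | hp
      · exact hle
      · exact lexLe_trans _ _ _ hle (hq p hp)
    · rename_i hnlt
      refine List.pairwise_cons.mpr ⟨?_, ih hrest⟩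
      intro p hp
      rcases List.mem_cons.mp ((perm_insertSorted e rest).mem_iff.mp hp) with rfl | hp'
      · exact lexLe_of_not_lt _ _ hnlt
      · exact hq p hp'

lemma foldl_insertSorted_perm (f : Nat → Int × Int) (l : List Nat) (acc : List (Int × Int)) :
    (l.foldl (fun acc i => insertSorted (f i) acc) acc).Perm (acc ++ l.map f) := by
  induction l generalizing acc with
  | nil => simp
  | cons x xs ih =>
    simp only [List.foldl_cons, List.map_cons]
    refine (ih _).trans ?_
    refine (((perm_insertSorted (f x) acc).append_right _).trans ?_)
    exact List.perm_middle.symm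

lemma foldl_insertSorted_sorted (f : Nat → Int × Int) (l : List Nat) (acc : List (Int × Int))
    (h : acc.Pairwise lexLe) :
    (l.foldl (fun acc i => insertSorted (f i) acc) acc).Pairwise lexLe := by
  induction l generalizing acc with
  | nil => exact h
  | cons x xs ih => exact ih _ (sorted_insertSorted _ _ h)

lemma initQueue_sorted (machines : List Int) : (initQueue machines).Pairwise lexLe :=
  foldl_insertSorted_sorted _ _ _ (List.Pairwise.nil)

lemma initQueue_perm (machines : List Int) :
    (initQueue machines).Perm (pairs machines (List.replicate machines.length 0)) := by
  have h := foldl_insertSorted_perm (fun i => (machines.getD i 0, (i : Int)))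
      (List.range machines.length) []
  unfold initQueue pairs
  refine h.trans ?_
  simp only [List.nil_append]
  apply List.Perm.of_eq
  apply List.map_congr_left
  intro i hi
  have hrep : (List.replicate machines.length (0 : Int)).getD i 0 = 0 := by
    rcases Nat.lt_or_ge i machines.length with h' | h'
    · simp [List.getD, h']
    · simp [List.getD, h']
  rw [hrep, zero_add]

lemma pairs_length (machines spent : List Int) :
    (pairs machines spent).length = machines.length := by simp [pairs]

lemma pairs_getElem (machines spent : List Int) (k : Nat) (hk : k < machines.length) :
    (pairs machines spent)[k]'(by simp [pairs_length, hk]) =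
      (spent.getD k 0 + machines.getD k 0, (k : Int)) := by
  simp [pairs]

lemma mem_pairs_iff (machines spent : List Int) (p : Int × Int) :
    p ∈ pairs machines spent ↔
      ∃ k : Nat, k < machines.length ∧ p = (spent.getD k 0 + machines.getD k 0, (k : Int)) := by
  unfold pairs
  simp only [List.mem_map, List.mem_range]
  constructor
  · rintro ⟨k, hk, rfl⟩; exact ⟨k, hk, rfl⟩
  · rintro ⟨k, hk, rfl⟩; exact ⟨k, hk, rfl⟩

lemma aAssign_length (machines spent : List Int) :
    (aAssign machines spent).length = machines.length := by simp [aAssign]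

lemma aAssign_getElem (machines spent : List Int) (k : Nat) (hk : k < machines.length) :
    (aAssign machines spent)[k]'(by simp [aAssign, hk]) =
      spent.getD k 0 + machines.getD k 0 := by
  simp [aAssign]

lemma aAssign_eq_map_fst (machines spent : List Int) :
    aAssign machines spent = (pairs machines spent).map Prod.fst := by
  simp [aAssign, pairs, List.map_map, Function.comp]

-- first-index characterisation of index?
lemma index?_eq_some_of (xs : List Int) (v : Int) (k : Nat) (hk : k < xs.length)
    (hv : xs[k] = v) (hmin : ∀ j (hj : j < k), xs[j]'(by omega) ≠ v) :
    PySem.List.index? xs v = some k := by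
  induction xs generalizing k with
  | nil => simp at hk
  | cons x xs ih =>
    cases k with
    | zero =>
      simp only [List.getElem_cons_zero] at hv
      subst hv
      exact PySem.List.index?_cons_self x xs
    | succ k =>
      have hx : x ≠ v := hmin 0 (Nat.succ_pos k)
      rw [PySem.List.index?_cons_of_ne xs hx,
        ih k (by simpa using hk) (by simpa using hv)
          (fun j hj => by simpa using hmin (j + 1) (by omega))]
      rfl

-- the main step lemma: from a sorted queue that is a permutation of A's pair list,
-- one step of A and one step of B produce the same output and re-related states.
lemma step_eq (machines spent : List Int) (t i : Int) (rest : List (Int × Int))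
    (hlen : spent.length = machines.length)
    (hs : ((t, i) :: rest).Pairwise lexLe)
    (hp : ((t, i) :: rest).Perm (pairs machines spent)) :
    (PySem.List.min? (aAssign machines spent) (fun x => x)).getD 0 = t ∧
    (PySem.List.index? (aAssign machines spent) t).getD 0 = i.toNat ∧
    ((insertSorted (t + machines.getD i.toNat 0, i) rest).Pairwise lexLe) ∧
    ((insertSorted (t + machines.getD i.toNat 0, i) rest).Perm
        (pairs machines (spent.set i.toNat t))) := by
  have hmem : (t, i) ∈ pairs machines spent := hp.subset List.mem_cons_self
  rcases (mem_pairs_iff _ _ _).mp hmem with ⟨j, hj, hji⟩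
  have hij : i = (j : Int) := congrArg Prod.snd hji
  have htj : t = spent.getD j 0 + machines.getD j 0 := congrArg Prod.fst hji
  have hitoNat : i.toNat = j := by simp [hij]
  have hle : ∀ p ∈ pairs machines spent, lexLe (t, i) p := by
    intro p hpmem
    rcases List.mem_cons.mp (hp.symm.subset hpmem) with h | h
    · rw [h]; exact Or.inr ⟨rfl, le_refl _⟩
    · exact (List.pairwise_cons.mp hs).1 p h
  have hmemAt : t ∈ aAssign machines spent := by
    rw [aAssign_eq_map_fst]
    exact List.mem_map.mpr ⟨(t, i), hmem, rfl⟩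
  have hminle : ∀ x ∈ aAssign machines spent, t ≤ x := by
    intro x hx
    rw [aAssign_eq_map_fst] at hx
    rcases List.mem_map.mp hx with ⟨p, hpmem, rfl⟩
    rcases hle p hpmem with h | ⟨h, _⟩
    · exact le_of_lt h
    · exact le_of_eq h
  have hne : aAssign machines spent ≠ [] := List.ne_nil_of_mem hmemAt
  have hmin : PySem.List.min? (aAssign machines spent) (fun x => x) = some t := by
    rcases hmm : PySem.List.min? (aAssign machines spent) (fun x => x) with _ | m
    · exact absurd ((PySem.List.min?_eq_none_iff _ _).mp hmm) hne
    · have hm1 : m ∈ aAssign machines spent := PySem.List.min?_mem hmm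
      have hm2 := PySem.List.min?_isMin hmm
      have h1 : t ≤ m := hminle m hm1
      have h2 : m ≤ t := hm2 t hmemAt
      rw [le_antisymm h2 h1]
  have hidx : PySem.List.index? (aAssign machines spent) t = some j := by
    refine index?_eq_some_of _ _ j (by rw [aAssign_length]; exact hj) ?_ ?_
    · rw [aAssign_getElem machines spent j hj]
      exact htj.symm
    · intro k hk
      have hkn : k < machines.length := by omega
      rw [aAssign_getElem machines spent k hkn]
      intro hval
      have hpmem : ((t, (k : Int)) : Int × Int) ∈ pairs machines spent := by
        rw [mem_pairs_iff]
        exact ⟨k, hkn, by rw [hval]⟩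
      rcases hle _ hpmem with h | ⟨_, h⟩
      · exact absurd h (by omega)
      · rw [hij] at h
        have : (j : Int) ≤ (k : Int) := h
        omega
  have hpairs_set : pairs machines (spent.set j t) =
      (pairs machines spent).set j (t + machines.getD j 0, (j : Int)) := by
    apply List.ext_getElem
    · simp [pairs_length]
    · intro k hk1 hk2
      have hkn : k < machines.length := by simpa [pairs_length] using hk1
      rw [pairs_getElem _ _ _ hkn, List.getElem_set]
      by_cases hkj : j = k
      · subst hkj
        rw [if_pos rfl]
        have hgd : (spent.set j t).getD j 0 = t := by
          rw [List.getD, List.getElem?_set_self (by omega)]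
          rfl
        rw [hgd]
      · rw [if_neg hkj, pairs_getElem _ _ _ hkn]
        have hgd : (spent.set j t).getD k 0 = spent.getD k 0 := by
          rw [List.getD, List.getElem?_set_ne (by omega), ← List.getD]
        rw [hgd]
  have hpj : (pairs machines spent)[j]'(by simp [pairs_length, hj]) = (t, i) := by
    rw [pairs_getElem _ _ _ hj, hji]
  have hdec : pairs machines spent =
      (pairs machines spent).take j ++ (t, i) :: (pairs machines spent).drop (j + 1) := by
    conv_lhs => rw [← List.take_append_drop j (pairs machines spent)]
    congr 1
    rw [List.drop_eq_getElem_cons (by simp [pairs_length, hj]), hpj]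
  have hset : (pairs machines spent).set j (t + machines.getD j 0, (j : Int)) =
      (pairs machines spent).take j ++ (t + machines.getD j 0, (j : Int)) ::
        (pairs machines spent).drop (j + 1) := by
    rw [List.set_eq_take_append_cons_drop]
    simp [pairs_length, hj]
  have hrest_perm : rest.Perm
      ((pairs machines spent).take j ++ (pairs machines spent).drop (j + 1)) := by
    have h1 : ((t, i) :: rest).Perm
        ((t, i) :: ((pairs machines spent).take j ++ (pairs machines spent).drop (j + 1))) := by
      refine hp.trans ?_
      conv_lhs => rw [hdec]
      exact List.perm_middle
    exact h1.cons_inv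
  refine ⟨by rw [hmin]; rfl, by rw [hidx, hitoNat]; rfl,
    sorted_insertSorted _ _ (List.pairwise_cons.mp hs).2, ?_⟩
  rw [hitoNat, hpairs_set, hset]
  refine (perm_insertSorted _ _).trans ?_
  refine ((hrest_perm.cons _).trans ?_)
  rw [hij]
  exact List.perm_middle.symm

lemma loop_eq (machines : List Int) (hm : machines ≠ []) :
    ∀ (k : Nat) (spent : List Int) (queue : List (Int × Int)),
      spent.length = machines.length →
      queue.Pairwise lexLe →
      queue.Perm (pairs machines spent) →
      aLoop machines k spent = bLoop machines k queue := by
  intro k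
  induction k with
  | zero => intro spent queue _ _ _; rfl
  | succ k ih =>
    intro spent queue hlen hs hp
    have hpairs_ne : pairs machines spent ≠ [] := by
      unfold pairs
      simpa using hm
    match queue, hs, hp with
    | [], _, hp => exact absurd hp.symm.eq_nil hpairs_ne
    | (t, i) :: rest, hs, hp =>
      obtain ⟨h1, h2, h3, h4⟩ := step_eq machines spent t i rest hlen hs hp
      simp only [aLoop, bLoop, h1, h2]
      rw [ih (spent.set i.toNat t) (insertSorted (t + machines.getD i.toNat 0, i) rest)
        (by simpa using hlen) h3 h4]

-- ===== VERDICT (by name: the statement is the Claim_ definition above) =====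
theorem machine_fin_times_spec : Claim_equal_machine_fin_times := by
  intro machines job_num _ hpre
  unfold Spec_machine_fin_times machine_fin_times machine_fin_times_alt
  by_cases hm : machines = []
  · rcases hpre with h | h
    · exact absurd hm h
    · have h0 : job_num.toNat = 0 := by omega
      rw [h0]
      rfl
  · exact loop_eq machines hm job_num.toNat _ _ (by simp)
      (initQueue_sorted machines) (initQueue_perm machines)
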